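-- pv_equiv track=rewrite | github.com/alexdevep7/Trabajo-Practico-Integrador-P1 | TP_INTEGRADOR/modulos/estadisticas.py | contar_paises_por_continente
-- ===== SOURCE A (Python) =====
-- def contar_paises_por_continente(paises):
--     """
--     Cuenta cuántos países hay en cada continente.
--
--     Args:
--         paises: Lista de diccionarios con países
--
--     Returns:
--         dict: Diccionario con continentes como claves y cantidad como valores
--     """
--     conteos = {}
--     for pais in paises:
--         continente = pais['continente']
--         if continente in conteos:
--             conteos[continente] += 1
--         else:
--             conteos[continente] = 1
--
--     # Ordenar por continente
--     return dict(sorted(conteos.items()))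
-- ===== SOURCE B (Python) =====
-- def contar_paises_por_continente(paises):
--     """Sort the continent names, then tally consecutive runs in one scan."""
--     conts = sorted(p['continente'] for p in paises)
--     res = {}
--     i = 0
--     n = len(conts)
--     while i < n:
--         j = i
--         while j < n and conts[j] == conts[i]:
--             j += 1
--         res[conts[i]] = j - i
--         i = j
--     return res
-- ===== Notes on version B (the rewrite author's own statement) =====
-- stated objective: alternative
-- what changed: Replaces A's hash-map tallying followed by sorting the (key,count) items with sorting the continent names first and emitting run lengths of equal names in a single scan; the keys come out already in sorted order.
import Mathlib
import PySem

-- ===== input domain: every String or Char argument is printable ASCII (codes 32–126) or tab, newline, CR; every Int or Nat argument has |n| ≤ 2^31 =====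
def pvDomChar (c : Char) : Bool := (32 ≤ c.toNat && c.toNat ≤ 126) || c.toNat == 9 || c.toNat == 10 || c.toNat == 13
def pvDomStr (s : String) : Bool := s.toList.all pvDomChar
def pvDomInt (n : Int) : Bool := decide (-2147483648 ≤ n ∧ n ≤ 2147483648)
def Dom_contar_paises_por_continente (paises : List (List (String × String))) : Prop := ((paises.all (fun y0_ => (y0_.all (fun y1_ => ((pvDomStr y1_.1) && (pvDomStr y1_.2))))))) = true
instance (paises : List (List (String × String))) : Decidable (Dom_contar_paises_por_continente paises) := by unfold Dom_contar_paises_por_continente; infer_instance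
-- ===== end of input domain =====

-- B replaces A's dict tallying + item sort by sorting the continent names and run-length
-- scanning consecutive equal names (alternative algorithm, similar cost).


-- ===== PORT A =====
-- pais['continente'] : first-match association-list lookup; Pre_ guarantees the key is
-- present (Python raises KeyError otherwise), so the "" default is never used there.
def contar_paises_por_continente (paises : List (List (String × String))) : List (String × Int) :=
  let conteos := paises.foldl (fun conteos pais =>
    let continente := (PySem.Dict.mk pais).getD "continente" ""
    if conteos.contains continente then
      conteos.insert continente (conteos.getD continente 0 + 1)
    else
      conteos.insert continente 1) PySem.Dict.empty
  PySem.List.sorted2 conteos.items (fun p => p.1) (fun p => p.2) false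

-- ===== PORT B =====
-- the while loops of Source B: j advances over the elements equal to conts[i] (takeWhile),
-- res[conts[i]] = j - i = 1 + length of that run in the tail, and i jumps to j (dropWhile)
def pvRuns (conts : List String) : List (String × Int) :=
  match conts with
  | [] => []
  | c :: rest =>
      (c, 1 + ((rest.takeWhile (fun y => y == c)).length : Int)) :: pvRuns (rest.dropWhile (fun y => y == c))
termination_by conts.length
decreasing_by
  simp only [List.length_cons]
  exact Nat.lt_succ_of_le (List.length_dropWhile_le _ _)

def contar_paises_por_continente_alt (paises : List (List (String × String))) : List (String × Int) :=
  let conts := PySem.List.sorted (paises.map (fun p => (PySem.Dict.mk p).getD "continente" "")) (fun x => x) false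
  pvRuns conts

-- ===== PRECONDITION & SPEC =====
-- Pre_ excludes exactly the inputs on which Python A raises KeyError: a country dict
-- without the key 'continente'.
def Pre_contar_paises_por_continente (paises : List (List (String × String))) : Prop :=
  ∀ pais ∈ paises, (PySem.Dict.mk pais).contains "continente" = true
instance (paises : List (List (String × String))) : Decidable (Pre_contar_paises_por_continente paises) := by unfold Pre_contar_paises_por_continente; infer_instance
def pvWitness_contar_paises_por_continente : (List (List (String × String))) :=
  [[("nombre", "Francia"), ("continente", "Europa")], [("continente", "Asia")], [("continente", "Europa")]]

def Spec_contar_paises_por_continente (paises : List (List (String × String))) (out : List (String × Int)) : Prop := out = contar_paises_por_continente_alt paises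
instance (paises : List (List (String × String))) (out : List (String × Int)) : Decidable (Spec_contar_paises_por_continente paises out) := by unfold Spec_contar_paises_por_continente; infer_instance

-- ===== CLAIM (what is proved, stated in full; the proofs are below) =====
def Claim_equal_contar_paises_por_continente : Prop := ∀ (paises : List (List (String × String))), Dom_contar_paises_por_continente paises → Pre_contar_paises_por_continente paises → Spec_contar_paises_por_continente paises (contar_paises_por_continente paises)

-- ===== LEMMAS AND PROOFS =====

-- inserting with `before` predicates that agree on x vs the list elements is the same
theorem pvInsertBy_congr {α : Type} (b1 b2 : α → α → Bool) (x : α) (ys : List α)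
    (h : ∀ y ∈ ys, b1 x y = b2 x y) :
    PySem.List.insertBy b1 x ys = PySem.List.insertBy b2 x ys := by
  induction ys with
  | nil => rfl
  | cons y ys ih =>
      simp only [PySem.List.insertBy]
      rw [h y (by simp)]
      by_cases hb : b2 x y = true
      · simp [hb]
      · simp only [Bool.not_eq_true] at hb
        simp [hb, ih (fun z hz => h z (by simp [hz]))]

theorem pvFoldl_insertBy_congr {α : Type} (b1 b2 : α → α → Bool) :
    ∀ (xs acc : List α),
    (∀ x ∈ xs, ∀ y, (y ∈ xs ∨ y ∈ acc) → b1 x y = b2 x y) →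
    xs.foldl (fun acc x => PySem.List.insertBy b1 x acc) acc
      = xs.foldl (fun acc x => PySem.List.insertBy b2 x acc) acc := by
  intro xs
  induction xs with
  | nil => intro acc _; rfl
  | cons x xs ih =>
      intro acc h
      simp only [List.foldl_cons]
      rw [pvInsertBy_congr b1 b2 x acc (fun y hy => h x (by simp) y (Or.inr hy))]
      exact ih _ (fun a ha y hy => by
        rcases hy with hy | hy
        · exact h a (by simp [ha]) y (Or.inl (by simp [hy]))
        · rcases (PySem.List.mem_insertBy _ _ _ _).1 hy with rfl | hy
          · exact h a (by simp [ha]) y (Or.inl (by simp))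
          · exact h a (by simp [ha]) y (Or.inr hy))

-- sorted2 with a first key that separates the list's elements is sorted by the first key
theorem pvSorted2_eq_sorted {α κ₁ κ₂ : Type} [LinearOrder κ₁] [LinearOrder κ₂]
    (xs : List α) (k1 : α → κ₁) (k2 : α → κ₂)
    (hinj : ∀ a ∈ xs, ∀ b ∈ xs, k1 a = k1 b → a = b) :
    PySem.List.sorted2 xs k1 k2 false = PySem.List.sorted xs k1 false := by
  simp only [PySem.List.sorted2, PySem.List.sorted, if_neg (by decide : ¬ (false = true))]
  apply pvFoldl_insertBy_congr
  intro a ha y hy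
  rcases hy with hy | hy
  · rcases lt_trichotomy (k1 a) (k1 y) with hlt | heq | hgt
    · simp [hlt]
    · obtain rfl := hinj a ha y hy heq
      simp
    · simp [hgt, not_lt.2 (le_of_lt hgt)]
  · simp at hy

-- after skipping the run of the head of a nondecreasing list, everything is larger
theorem pvDrop_gt (c : String) (rest : List String) (hs : (c :: rest).Pairwise (· ≤ ·)) :
    ∀ y ∈ rest.dropWhile (fun y => y == c), c < y := by
  intro y hy
  have hle : ∀ z ∈ rest, c ≤ z := (List.pairwise_cons.1 hs).1
  have hd : (rest.dropWhile (fun y => y == c)).Pairwise (· ≤ ·) :=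
    hs.of_cons.sublist (List.dropWhile_sublist _)
  rcases hD : rest.dropWhile (fun y => y == c) with _ | ⟨d0, ds⟩
  · simp [hD] at hy
  · have hd0c : d0 ≠ c := by
      have h := List.head?_dropWhile_not (fun y => y == c) rest
      rw [hD] at h
      simp only [List.head?_cons] at h
      simpa using h
    have hd0mem : d0 ∈ rest := (List.dropWhile_sublist _).mem (by rw [hD]; simp)
    have hcd0 : c < d0 := lt_of_le_of_ne (hle d0 hd0mem) (Ne.symm hd0c)
    rw [hD] at hy hd
    rcases List.mem_cons.1 hy with rfl | hy
    · exact hcd0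
    · exact lt_of_lt_of_le hcd0 ((List.pairwise_cons.1 hd).1 y hy)

-- membership in pvRuns of a nondecreasing list: exactly the pairs (value, its count)
theorem pvRuns_mem (ys : List String) (hs : ys.Pairwise (· ≤ ·)) (p : String × Int) :
    p ∈ pvRuns ys ↔ p.1 ∈ ys ∧ p.2 = (ys.count p.1 : Int) := by
  induction ys using pvRuns.induct generalizing p with
  | case1 => simp [pvRuns]
  | case2 c rest ih =>
      have hrest : rest.Pairwise (· ≤ ·) := hs.of_cons
      have hd : (rest.dropWhile (fun y => y == c)).Pairwise (· ≤ ·) :=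
        hrest.sublist (List.dropWhile_sublist _)
      have ht : ∀ y ∈ rest.takeWhile (fun y => y == c), y = c := by
        intro y hy
        have h := List.mem_takeWhile_imp hy
        exact eq_of_beq h
      have hdn := pvDrop_gt c rest hs
      have hcount : ∀ v : String,
          rest.count v = (rest.takeWhile (fun y => y == c)).count v
            + (rest.dropWhile (fun y => y == c)).count v := by
        intro v
        conv_lhs => rw [← List.takeWhile_append_dropWhile (p := fun y => y == c) (l := rest)]
        exact List.count_append ..
      have htc : (rest.takeWhile (fun y => y == c)).count c
          = (rest.takeWhile (fun y => y == c)).length :=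
        List.count_eq_length.2 (fun y hy => by simp [ht y hy])
      have hdc : (rest.dropWhile (fun y => y == c)).count c = 0 :=
        List.count_eq_zero.2 (fun hy => lt_irrefl c (hdn c hy))
      obtain ⟨a, b⟩ := p
      rw [pvRuns]
      simp only [List.mem_cons, Prod.mk.injEq]
      have hcc : ((c :: rest).count c : Int)
          = 1 + ((rest.takeWhile (fun y => y == c)).length : Int) := by
        rw [List.count_cons_self, hcount c, htc, hdc]
        push_cast; ring
      constructor
      · rintro (⟨h1, h2⟩ | hp)
        · subst h1
          exact ⟨Or.inl rfl, by rw [h2, hcc]⟩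
        · obtain ⟨ha, hb⟩ := (ih hd (a, b)).1 hp
          have hac : c < a := hdn a ha
          have haR : a ∈ rest := (List.dropWhile_sublist _).mem ha
          have htc0 : (rest.takeWhile (fun y => y == c)).count a = 0 :=
            List.count_eq_zero.2 (fun hy => lt_irrefl c ((ht a hy) ▸ hac))
          refine ⟨Or.inr haR, ?_⟩
          rw [List.count_cons_of_ne (ne_of_lt hac), hcount a, htc0]
          simpa using hb
      · rintro ⟨ha, hb⟩
        by_cases hac : a = c
        · subst hac
          left
          exact ⟨rfl, by rw [hb, hcc]⟩
        · right
          have haR : a ∈ rest := by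
            rcases ha with rfl | h
            · exact absurd rfl hac
            · exact h
          have haD : a ∈ rest.dropWhile (fun y => y == c) := by
            have : a ∈ rest.takeWhile (fun y => y == c) ++ rest.dropWhile (fun y => y == c) := by
              rw [List.takeWhile_append_dropWhile]; exact haR
            rcases List.mem_append.1 this with h | h
            · exact absurd (ht a h) hac
            · exact h
          have htc0 : (rest.takeWhile (fun y => y == c)).count a = 0 :=
            List.count_eq_zero.2 (fun hy => hac (ht a hy))
          refine (ih hd (a, b)).2 ⟨haD, ?_⟩
          rw [hb, List.count_cons_of_ne (Ne.symm hac), hcount a, htc0]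
          simp
  
-- pvRuns of a nondecreasing list is strictly increasing in the first component
theorem pvRuns_pairwise (ys : List String) (hs : ys.Pairwise (· ≤ ·)) :
    (pvRuns ys).Pairwise (fun p q => p.1 < q.1) := by
  induction ys using pvRuns.induct with
  | case1 => simp [pvRuns]
  | case2 c rest ih =>
      have hd : (rest.dropWhile (fun y => y == c)).Pairwise (· ≤ ·) :=
        hs.of_cons.sublist (List.dropWhile_sublist _)
      rw [pvRuns]
      refine List.pairwise_cons.2 ⟨?_, ih hd⟩
      intro q hq
      exact pvDrop_gt c rest hs q.1 ((pvRuns_mem _ hd q).1 hq).1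

-- ===== VERDICT (by name: the statement is the Claim_ definition above) =====
theorem contar_paises_por_continente_spec : Claim_equal_contar_paises_por_continente := by
  intro paises _ _
  unfold Spec_contar_paises_por_continente
  unfold contar_paises_por_continente contar_paises_por_continente_alt
  set xs := paises.map (fun p => (PySem.Dict.mk p).getD "continente" "") with hxs
  -- step 1: A's counting loop is Counter(xs)
  have hstep : (fun (d : PySem.Dict String Int) (pais : List (String × String)) =>
      let continente := (PySem.Dict.mk pais).getD "continente" ""
      if d.contains continente then
        d.insert continente (d.getD continente 0 + 1)
      else
        d.insert continente 1)
      = (fun d pais => d.modify ((PySem.Dict.mk pais).getD "continente" "") 0 (· + 1)) := by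
    funext d pais
    simp only [PySem.Dict.modify]
    by_cases h : d.contains ((PySem.Dict.mk pais).getD "continente" "") = true
    · simp [h]
    · have hf : d.contains ((PySem.Dict.mk pais).getD "continente" "") = false := by
        simpa using h
      rw [if_neg h, PySem.Dict.getD_of_not_contains d 0 hf]
      norm_num
  have hfold : (paises.foldl (fun conteos pais =>
      let continente := (PySem.Dict.mk pais).getD "continente" ""
      if conteos.contains continente then
        conteos.insert continente (conteos.getD continente 0 + 1)
      else
        conteos.insert continente 1) PySem.Dict.empty) = PySem.Dict.counter xs := by
    rw [hstep, PySem.Dict.counter_eq_foldl, hxs, List.foldl_map]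
  rw [hfold]
  -- step 2: sorted2 over the distinct-keyed items is sorting by the key
  have hitems := PySem.Dict.items_counter xs
  have hinj : ∀ a ∈ (PySem.Dict.counter xs).items, ∀ b ∈ (PySem.Dict.counter xs).items,
      a.1 = b.1 → a = b := by
    rw [hitems]
    intro a ha b hb h1
    obtain ⟨ka, _, rfl⟩ := List.mem_map.1 ha
    obtain ⟨kb, _, rfl⟩ := List.mem_map.1 hb
    simp only at h1
    subst h1; rfl
  rw [pvSorted2_eq_sorted _ _ _ hinj]
  -- step 3: B's output is a strictly key-increasing rearrangement of those items
  have hM : (PySem.List.sorted xs (fun x => x) false).Pairwise (· ≤ ·) := by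
    have := PySem.List.sorted_pairwise xs (fun x => x)
    simpa using this
  have hperm : (pvRuns (PySem.List.sorted xs (fun x => x) false)).Perm
      ((PySem.Dict.counter xs).items) := by
    have hnd1 : (pvRuns (PySem.List.sorted xs (fun x => x) false)).Nodup :=
      (pvRuns_pairwise _ hM).imp (fun h => by
        intro he; rw [he] at h; exact lt_irrefl _ h)
    have hnd2 : ((PySem.Dict.counter xs).items).Nodup := by
      rw [hitems]
      exact (PySem.Set.nodup_ofList xs).map (fun k k' hk => by
        simpa using congrArg Prod.fst hk)
    rw [List.perm_ext_iff_of_nodup hnd1 hnd2]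
    intro p
    rw [pvRuns_mem _ hM p, hitems]
    have hcnt : (PySem.List.sorted xs (fun x => x) false).count p.1 = xs.count p.1 :=
      (PySem.List.sorted_perm xs (fun x => x) false).count_eq p.1
    constructor
    · rintro ⟨hmem, hval⟩
      refine List.mem_map.2 ⟨p.1, (PySem.Set.mem_ofList xs p.1).2 ?_, ?_⟩
      · exact (PySem.List.mem_sorted xs (fun x => x) false p.1).1 hmem
      · rw [← hcnt, ← hval]
    · intro hp
      obtain ⟨k, hk, rfl⟩ := List.mem_map.1 hp
      refine ⟨?_, by simpa using hcnt.symm⟩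
      exact (PySem.List.mem_sorted xs (fun x => x) false k).2
        ((PySem.Set.mem_ofList xs k).1 hk)
  have hpw : (pvRuns (PySem.List.sorted xs (fun x => x) false)).Pairwise
      (fun a b => a.1 < b.1) := pvRuns_pairwise _ hM
  show PySem.List.sorted (PySem.Dict.counter xs).items (fun p => p.1) false
      = pvRuns (PySem.List.sorted xs (fun x => x) false)
  exact PySem.List.sorted_eq_of_perm_of_pairwise_lt _ _ (fun p => p.1) hperm hpw
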